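-- pv_equiv track=rewrite | github.com/vbmelo/Merkle-Hellman_cryptosystem-Projeto1_AED_21-22 | ideias.py | subsetSumIncreasing
-- ===== SOURCE A (Python) =====
-- def subsetSumIncreasing(arr, val):
--     assert arr == sorted(arr)
--     result = []
--     n = len(arr)
--     if n  == 0:
--         return result;
--     idx = 0;
--     hit = False;
--     for i in range(n-1, -1, -1):
--         if (arr[i] <= val):
--             idx = i;
--             hit = True;
--             break
--     if hit:
--         result.extend(subsetSumIncreasing(arr[0:idx], val - arr[idx]))
--         result.extend([idx])  #extend list  by appending elements from the iterable
--     return result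
-- ===== SOURCE B (Python) =====
-- def subsetSumIncreasing(arr, val):
--     assert arr == sorted(arr)
--     picked = []
--     rem = val
--     for i in range(len(arr) - 1, -1, -1):
--         if arr[i] <= rem:
--             picked.append(i)
--             rem -= arr[i]
--     picked.reverse()
--     return picked
-- ===== Notes on version B (the rewrite author's own statement) =====
-- stated objective: faster
-- what changed: replaces the recursion that rescans and re-slices (and re-sorts in the assert) a prefix at every pick with a single downward pass that greedily takes each index whose element fits the remaining value, then reverses the collected indices
import Mathlib
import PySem

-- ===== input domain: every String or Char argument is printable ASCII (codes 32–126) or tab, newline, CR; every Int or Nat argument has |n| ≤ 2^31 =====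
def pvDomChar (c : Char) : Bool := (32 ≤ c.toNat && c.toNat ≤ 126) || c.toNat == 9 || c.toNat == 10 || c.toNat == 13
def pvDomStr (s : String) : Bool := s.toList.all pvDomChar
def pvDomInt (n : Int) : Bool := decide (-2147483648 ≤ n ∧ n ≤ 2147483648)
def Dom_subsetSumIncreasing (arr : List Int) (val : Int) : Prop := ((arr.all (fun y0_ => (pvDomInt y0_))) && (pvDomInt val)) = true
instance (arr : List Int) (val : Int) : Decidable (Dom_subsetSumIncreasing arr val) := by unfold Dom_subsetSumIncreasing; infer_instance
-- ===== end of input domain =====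

set_option maxHeartbeats 1000000


-- B replaces A's recursion (which rescans and re-slices a prefix at every pick) with one
-- downward greedy pass collecting fitting indices, reversed at the end; objective: faster.

-- ===== PORT A =====
-- the 'for i in range(n-1,-1,-1): if arr[i] <= val: idx=i; hit=True; break' loop:
-- called with k = n, checks i = k-1, k-2, …, 0; some i = (hit, idx=i), none = not hit
def pyFindHit (arr : List Int) (val : Int) : Nat → Option Nat
  | 0 => none
  | k + 1 => if arr.getD k 0 ≤ val then some k else pyFindHit arr val k

theorem pyFindHit_lt (arr : List Int) (val : Int) (k idx : Nat)
    (h : pyFindHit arr val k = some idx) : idx < k := by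
  induction k with
  | zero => simp [pyFindHit] at h
  | succ k ih =>
    simp only [pyFindHit] at h
    split at h
    · simp only [Option.some.injEq] at h
      omega
    · exact Nat.lt_succ_of_lt (ih h)

-- 'assert arr == sorted(arr)' raises on unsorted input: excluded by Pre_.
def subsetSumIncreasing (arr : List Int) (val : Int) : List Int :=
  if arr.length = 0 then []
  else
    match _h : pyFindHit arr val arr.length with
    | none => []
    | some idx =>
      subsetSumIncreasing (PySem.List.slice arr (some 0) (some (idx : Int))) (val - arr.getD idx 0)
        ++ [(idx : Int)]
termination_by arr.length
decreasing_by
  have := pyFindHit_lt arr val arr.length idx _h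
  simp [PySem.List.slice_zero_start, PySem.List.slice_to_natCast]
  omega

-- ===== PORT B =====
-- Source B's single downward loop: k counts down, picks every index whose element fits rem
def altGo (arr : List Int) : Nat → Int → List Int
  | 0, _ => []
  | k + 1, rem =>
    if arr.getD k 0 ≤ rem then (k : Int) :: altGo arr k (rem - arr.getD k 0)
    else altGo arr k rem

def subsetSumIncreasing_alt (arr : List Int) (val : Int) : List Int :=
  (altGo arr arr.length val).reverse

-- ===== PRECONDITION & SPEC =====
-- Pre_ excludes unsorted arr, on which A's (and B's) 'assert arr == sorted(arr)' raises AssertionError.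
def Pre_subsetSumIncreasing (arr : List Int) (val : Int) : Prop := arr.Pairwise (· ≤ ·)
instance (arr : List Int) (val : Int) : Decidable (Pre_subsetSumIncreasing arr val) := by
  unfold Pre_subsetSumIncreasing; infer_instance
def pvWitness_subsetSumIncreasing : List Int × Int := ([1, 2, 3], 4)

def Spec_subsetSumIncreasing (arr : List Int) (val : Int) (out : List Int) : Prop := out = subsetSumIncreasing_alt arr val
instance (arr : List Int) (val : Int) (out : List Int) : Decidable (Spec_subsetSumIncreasing arr val out) := by unfold Spec_subsetSumIncreasing; infer_instance

-- ===== CLAIM (what is proved, stated in full; the proofs are below) =====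
def Claim_equal_subsetSumIncreasing : Prop := ∀ (arr : List Int) (val : Int), Dom_subsetSumIncreasing arr val → Pre_subsetSumIncreasing arr val → Spec_subsetSumIncreasing arr val (subsetSumIncreasing arr val)

-- ===== LEMMAS AND PROOFS =====

theorem altGo_of_findHit_none (arr : List Int) (val : Int) (k : Nat)
    (h : pyFindHit arr val k = none) : altGo arr k val = [] := by
  induction k with
  | zero => simp [altGo]
  | succ k ih =>
    simp only [pyFindHit] at h
    split at h
    · exact absurd h (by simp)
    · rename_i hc
      simp only [altGo, if_neg hc]
      exact ih h

theorem altGo_of_findHit_some (arr : List Int) (val : Int) (k idx : Nat)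
    (h : pyFindHit arr val k = some idx) :
    altGo arr k val = (idx : Int) :: altGo arr idx (val - arr.getD idx 0) := by
  induction k with
  | zero => simp [pyFindHit] at h
  | succ k ih =>
    simp only [pyFindHit] at h
    split at h
    · rename_i hc
      cases h
      simp only [altGo, if_pos hc]
    · rename_i hc
      simp only [altGo, if_neg hc]
      exact ih h

theorem altGo_take (arr : List Int) (j : Nat) :
    ∀ (k : Nat) (rem : Int), k ≤ j → altGo (arr.take j) k rem = altGo arr k rem := by
  intro k
  induction k with
  | zero => intro rem _; simp [altGo]
  | succ k ih =>
    intro rem hkj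
    have hget : (arr.take j).getD k 0 = arr.getD k 0 := by
      simp [List.getD, Nat.lt_of_succ_le hkj]
    simp only [altGo, hget]
    split
    · rw [ih _ (by omega)]
    · exact ih _ (by omega)

theorem main_eq (arr : List Int) (val : Int) :
    subsetSumIncreasing arr val = (altGo arr arr.length val).reverse := by
  induction hn : arr.length using Nat.strong_induction_on generalizing arr val with
  | _ n ih =>
    subst hn
    rw [subsetSumIncreasing]
    by_cases h0 : arr.length = 0
    · simp [h0, altGo]
    · simp only [if_neg h0]
      split
      · rename_i hnone
        rw [altGo_of_findHit_none arr val arr.length hnone]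
        simp
      · rename_i idx hsome
        have hlt := pyFindHit_lt arr val arr.length idx hsome
        rw [altGo_of_findHit_some arr val arr.length idx hsome]
        have hslice : PySem.List.slice arr (some 0) (some (idx : Int)) = arr.take idx := by
          simp [PySem.List.slice_zero_start, PySem.List.slice_to_natCast]
        have hlen : (arr.take idx).length = idx := by simp; omega
        rw [hslice, ih (arr.take idx).length (by omega) (arr.take idx) (val - arr.getD idx 0) rfl,
          hlen, altGo_take arr idx idx _ le_rfl]
        simp

-- ===== VERDICT (by name: the statement is the Claim_ definition above) =====
theorem subsetSumIncreasing_spec : Claim_equal_subsetSumIncreasing := by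
  intro arr val _ _
  unfold Spec_subsetSumIncreasing subsetSumIncreasing_alt
  exact main_eq arr val
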